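-- pv_equiv track=rewrite | github.com/Sebastian1811/Taller_2_Simulacion | Pruebas_independencia.py | MapearPares
-- ===== SOURCE A (Python) =====
-- def MapearPares(recurrencias):
--     listaPares = list()
--     count = 0
--     for i in range(len(recurrencias)-1):
--         if count < (len(recurrencias)-1):
--             listaPares.append([recurrencias[count],recurrencias[count+1]])
--             count+=2
--     return listaPares
-- ===== SOURCE B (Python) =====
-- def MapearPares(recurrencias):
--     pares = []
--     pendiente = None
--     for x in recurrencias:
--         if pendiente is None:
--             pendiente = x
--         else:
--             pares.append([pendiente, x])
--             pendiente = None
--     return pares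
-- ===== Notes on version B (the rewrite author's own statement) =====
-- stated objective: simpler
-- what changed: Replaced the index-based loop (a counter stepped by two with a guard, indexing back into the list) by a single direct pass over the elements that carries a pending element and emits a pair whenever one is held.
import Mathlib
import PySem

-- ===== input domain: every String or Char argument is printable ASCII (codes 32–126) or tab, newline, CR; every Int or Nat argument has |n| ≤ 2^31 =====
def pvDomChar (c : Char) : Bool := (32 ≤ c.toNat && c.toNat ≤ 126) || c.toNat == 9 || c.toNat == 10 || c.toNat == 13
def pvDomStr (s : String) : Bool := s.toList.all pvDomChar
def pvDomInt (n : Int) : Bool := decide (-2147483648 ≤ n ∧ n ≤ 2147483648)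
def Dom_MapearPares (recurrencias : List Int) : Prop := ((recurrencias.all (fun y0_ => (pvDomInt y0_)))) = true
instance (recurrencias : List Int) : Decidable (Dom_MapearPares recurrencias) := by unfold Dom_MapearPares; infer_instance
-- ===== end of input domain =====

-- B replaces A's counter-stepping, index-based loop with a single direct pass over the elements carrying a pending element (objective: simpler).

-- ===== PORT A =====
-- loop body: if count < len(xs)-1: listaPares.append([xs[count], xs[count+1]]); count += 2
-- (when the guard holds, both indices are in range, so the total pyGetD is exact here)
def stepA (xs : List Int) (s : List (List Int) × Int) (_i : Int) : List (List Int) × Int :=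
  if s.2 < PySem.List.len xs - 1 then
    (s.1 ++ [[PySem.List.pyGetD xs s.2 0, PySem.List.pyGetD xs (s.2 + 1) 0]], s.2 + 2)
  else s

def MapearPares (recurrencias : List Int) : List (List Int) :=
  (List.foldl (stepA recurrencias) ([], 0)
    (PySem.List.pyRange 0 (PySem.List.len recurrencias - 1) 1)).1

-- ===== PORT B =====
-- loop body: if pendiente is None: pendiente = x  else: pares.append([pendiente, x]); pendiente = None
def stepB (s : List (List Int) × Option Int) (x : Int) : List (List Int) × Option Int :=
  match s.2 with
  | none => (s.1, some x)
  | some p => (s.1 ++ [[p, x]], none)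

def MapearPares_alt (recurrencias : List Int) : List (List Int) :=
  (recurrencias.foldl stepB ([], none)).1

-- ===== PRECONDITION & SPEC =====
def Spec_MapearPares (recurrencias : List Int) (out : List (List Int)) : Prop := out = MapearPares_alt recurrencias
instance (recurrencias : List Int) (out : List (List Int)) : Decidable (Spec_MapearPares recurrencias out) := by unfold Spec_MapearPares; infer_instance

-- ===== CLAIM (what is proved, stated in full; the proofs are below) =====
def Claim_equal_MapearPares : Prop := ∀ (recurrencias : List Int), Dom_MapearPares recurrencias → Spec_MapearPares recurrencias (MapearPares recurrencias)

-- ===== LEMMAS AND PROOFS =====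

-- the pairs A's loop produces from counter position c onwards
def pairsFrom (xs : List Int) (c : Nat) : List (List Int) :=
  if c + 1 < xs.length then [xs.getD c 0, xs.getD (c + 1) 0] :: pairsFrom xs (c + 2) else []
termination_by xs.length - c

lemma pairsFrom_stop (xs : List Int) (c : Nat) (h : ¬ c + 1 < xs.length) : pairsFrom xs c = [] := by
  rw [pairsFrom, if_neg h]

lemma loopA (xs : List Int) (L : List Int) :
    ∀ (acc : List (List Int)) (c : Nat), xs.length ≤ 2 * L.length + c + 1 →
    (List.foldl (stepA xs) (acc, (c : Int)) L).1 = acc ++ pairsFrom xs c := by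
  induction L with
  | nil =>
    intro acc c h
    simp only [List.length_nil] at h
    simp [pairsFrom_stop xs c (by omega)]
  | cons i L ih =>
    intro acc c h
    rw [List.foldl_cons]
    by_cases hg : c + 1 < xs.length
    · have hcond : ((c : Int) < PySem.List.len xs - 1) := by
        rw [PySem.List.len_eq]; omega
      rw [show stepA xs (acc, (c : Int)) i
            = (acc ++ [[PySem.List.pyGetD xs (c : Int) 0, PySem.List.pyGetD xs ((c : Int) + 1) 0]],
               ((c + 2 : Nat) : Int)) by
        simp only [stepA, if_pos hcond]; push_cast; ring_nf]
      rw [ih _ (c + 2) (by simp only [List.length_cons] at h; omega)]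
      conv_rhs => rw [pairsFrom]
      rw [if_pos hg]
      rw [show ((c : Int) + 1) = ((c + 1 : Nat) : Int) by push_cast; ring]
      simp only [PySem.List.pyGetD_natCast, List.append_assoc, List.singleton_append]
    · have hcond : ¬ ((c : Int) < PySem.List.len xs - 1) := by
        rw [PySem.List.len_eq]; omega
      rw [show stepA xs (acc, (c : Int)) i = (acc, (c : Int)) by
        simp only [stepA, if_neg hcond]]
      exact ih acc c (by simp only [List.length_cons] at h; omega)

lemma pairsFrom_shift (a b : Int) (t : List Int) :
    ∀ (n c : Nat), t.length - c ≤ n → pairsFrom (a :: b :: t) (c + 2) = pairsFrom t c := by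
  intro n
  induction n with
  | zero =>
    intro c h
    rw [pairsFrom_stop _ _ (by simp only [List.length_cons]; omega),
        pairsFrom_stop _ _ (by omega)]
  | succ n ih =>
    intro c h
    by_cases hg : c + 1 < t.length
    · rw [pairsFrom, if_pos (by simp only [List.length_cons]; omega)]
      conv_rhs => rw [pairsFrom, if_pos hg]
      rw [show c + 2 + 2 = (c + 2) + 2 from rfl, ih (c + 2) (by omega)]
      simp
    · rw [pairsFrom_stop _ _ (by simp only [List.length_cons]; omega), pairsFrom_stop _ _ hg]

lemma pairsFrom_cons_cons (a b : Int) (t : List Int) :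
    pairsFrom (a :: b :: t) 0 = [a, b] :: pairsFrom t 0 := by
  rw [pairsFrom, if_pos (by simp only [List.length_cons]; omega)]
  rw [pairsFrom_shift a b t t.length 0 (by omega)]
  simp [List.getD]

lemma loopB : ∀ (n : Nat) (xs : List Int) (acc : List (List Int)), xs.length ≤ n →
    (List.foldl stepB (acc, none) xs).1 = acc ++ pairsFrom xs 0 := by
  intro n
  induction n with
  | zero =>
    intro xs acc h
    obtain rfl : xs = [] := List.eq_nil_of_length_eq_zero (by omega)
    simp [pairsFrom_stop [] 0 (by simp)]
  | succ n ih =>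
    intro xs acc h
    match xs with
    | [] => simp [pairsFrom_stop [] 0 (by simp)]
    | [a] =>
      simp only [List.foldl_cons, List.foldl_nil, stepB]
      rw [pairsFrom_stop [a] 0 (by simp)]
      simp
    | a :: b :: t =>
      rw [List.foldl_cons, List.foldl_cons,
          show stepB (acc, none) a = (acc, some a) from rfl,
          show stepB (acc, some a) b = (acc ++ [[a, b]], none) from rfl,
          ih t (acc ++ [[a, b]]) (by simp only [List.length_cons] at h; omega),
          pairsFrom_cons_cons]
      simp

-- ===== VERDICT (by name: the statement is the Claim_ definition above) =====
theorem MapearPares_spec : Claim_equal_MapearPares := by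
  intro xs _
  unfold Spec_MapearPares MapearPares
  have h := loopA xs (PySem.List.pyRange 0 (PySem.List.len xs - 1) 1) [] 0
    (by rw [PySem.List.length_pyRange_one]; rw [PySem.List.len_eq]; omega)
  rw [show MapearPares_alt xs = [] ++ pairsFrom xs 0 from loopB xs.length xs [] (le_refl _)]
  simpa using h
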